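-- pv_equiv track=rewrite | github.com/muresanianis450/UBB_CS | Year 1/Sem1/FP/Assignments/a5/src/program.py | f5a
-- ===== SOURCE A (Python) =====
-- def get_real(list):
--     real,img = list
--     return real
--
-- def get_imaginary(list):
--     real, img = list
--     return img
--
-- def f5a(complex_numbers):
--     k=0
--     maxi=0
--     j=0
--     l=0
--     for complex_number in complex_numbers:
--         r=get_real(complex_number)
--         i=get_imaginary(complex_number)
--         s=r*r+i*i # modulus of a complex number is sqrt(r^2 + i^2) , this result should be in the interval [0,10]
--         if s<=100:# raise to the 2nd power the sqrt so our interval will now be [0,100]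
--             k+=1
--             if k>maxi:
--                 maxi=k
--                 l=j#the index of the last element in our longest subarray
--         else:
--             k=0
--         j+=1
--     return maxi,l
-- ===== SOURCE B (Python) =====
-- def f5a(complex_numbers):
--     # phase 1: materialize every maximal run of moduli <= 10 as (length, end_index)
--     groups = []
--     cur = 0
--     idx = 0
--     for (real, img) in complex_numbers:
--         if real * real + img * img <= 100:
--             cur += 1
--         else:
--             if cur:
--                 groups.append((cur, idx - 1))
--             cur = 0
--         idx += 1
--     if cur:
--         groups.append((cur, idx - 1))
--     # phase 2: the first strictly-longest run wins
--     best = (0, 0)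
--     for g in groups:
--         if g[0] > best[0]:
--             best = g
--     return best
-- ===== Notes on version B (the rewrite author's own statement) =====
-- stated objective: alternative
-- what changed: A tracks the best run online inside one loop with four interleaved counters; B first materializes every maximal run of moduli <= 10 as a (length, end_index) list, then selects the first strictly-longest run in a second pass.
import Mathlib
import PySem

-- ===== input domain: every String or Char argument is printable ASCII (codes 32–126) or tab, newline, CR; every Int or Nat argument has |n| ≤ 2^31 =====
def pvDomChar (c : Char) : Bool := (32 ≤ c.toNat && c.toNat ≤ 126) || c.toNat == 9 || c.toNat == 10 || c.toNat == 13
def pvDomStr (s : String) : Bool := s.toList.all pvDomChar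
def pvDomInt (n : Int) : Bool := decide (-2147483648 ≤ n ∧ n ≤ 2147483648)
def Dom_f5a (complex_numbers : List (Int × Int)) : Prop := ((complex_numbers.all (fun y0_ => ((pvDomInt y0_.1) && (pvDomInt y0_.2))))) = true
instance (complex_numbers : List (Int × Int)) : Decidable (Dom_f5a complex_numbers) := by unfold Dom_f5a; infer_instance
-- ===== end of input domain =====

-- B replaces A's online best-run tracking by a two-phase decomposition (materialize runs, then select); same value, same O(n) cost.

-- ===== PORT A =====
-- state (k, maxi, j, l): current run length, best length, index counter, best end index
def pvStepA (st : Int × Int × Int × Int) (c : Int × Int) : Int × Int × Int × Int :=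
  match st with
  | (k, maxi, j, l) =>
    let r := c.1
    let i := c.2
    let s := r * r + i * i
    if s ≤ 100 then
      if k + 1 > maxi then (k + 1, k + 1, j + 1, j) else (k + 1, maxi, j + 1, l)
    else (0, maxi, j + 1, l)

def f5a (complex_numbers : List (Int × Int)) : Int × Int :=
  let st := complex_numbers.foldl pvStepA (0, 0, 0, 0)
  (st.2.1, st.2.2.2)

-- ===== PORT B =====
-- "if cur: groups.append((cur, idx - 1))"
def pvFlush (groups : List (Int × Int)) (cur idx : Int) : List (Int × Int) :=
  if cur ≠ 0 then groups ++ [(cur, idx - 1)] else groups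

-- phase-1 loop body over state (groups, cur, idx)
def pvStepB (st : List (Int × Int) × Int × Int) (c : Int × Int) : List (Int × Int) × Int × Int :=
  match st with
  | (groups, cur, idx) =>
    if c.1 * c.1 + c.2 * c.2 ≤ 100 then (groups, cur + 1, idx + 1)
    else (pvFlush groups cur idx, 0, idx + 1)

-- phase-2 loop body: first strictly-longest run wins
def pvBestStep (best g : Int × Int) : Int × Int := if g.1 > best.1 then g else best

def f5a_alt (complex_numbers : List (Int × Int)) : Int × Int :=
  let st := complex_numbers.foldl pvStepB ([], 0, 0)
  (pvFlush st.1 st.2.1 st.2.2).foldl pvBestStep (0, 0)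

-- ===== PRECONDITION & SPEC =====
def Spec_f5a (complex_numbers : List (Int × Int)) (out : Int × Int) : Prop := out = f5a_alt complex_numbers
instance (complex_numbers : List (Int × Int)) (out : Int × Int) : Decidable (Spec_f5a complex_numbers out) := by unfold Spec_f5a; infer_instance

-- ===== CLAIM (what is proved, stated in full; the proofs are below) =====
def Claim_equal_f5a : Prop := ∀ (complex_numbers : List (Int × Int)), Dom_f5a complex_numbers → Spec_f5a complex_numbers (f5a complex_numbers)

-- ===== LEMMAS AND PROOFS =====

def pvBest (gs : List (Int × Int)) : Int × Int := gs.foldl pvBestStep (0, 0)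

theorem pvBest_append (gs : List (Int × Int)) (g : Int × Int) :
    pvBest (gs ++ [g]) = pvBestStep (pvBest gs) g := by
  simp [pvBest, List.foldl_append]

-- pvBest sees through the flush of a zero run
theorem pvFlush_zero (groups : List (Int × Int)) (idx : Int) :
    pvFlush groups 0 idx = groups := by simp [pvFlush]

-- Main invariant: running A's loop from a state matched with B's phase-1 state keeps them matched.
theorem pvInv (xs : List (Int × Int)) :
    ∀ (maxi l : Int) (groups : List (Int × Int)) (cur idx : Int),
    0 ≤ cur →
    (maxi, l) = pvBest (pvFlush groups cur idx) →
    (xs.foldl pvStepA (cur, maxi, idx, l)) =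
      (let sB := xs.foldl pvStepB (groups, cur, idx)
       let b := pvBest (pvFlush sB.1 sB.2.1 sB.2.2)
       (sB.2.1, b.1, sB.2.2, b.2)) ∧
    0 ≤ (xs.foldl pvStepB (groups, cur, idx)).2.1 := by
  induction xs with
  | nil =>
    intro maxi l groups cur idx hc hinv
    constructor
    · simp only [List.foldl]
      rw [← hinv]
    · simpa using hc
  | cons c xs ih =>
    intro maxi l groups cur idx hc hinv
    by_cases hs : c.1 * c.1 + c.2 * c.2 ≤ 100
    · -- good element: run extends
      have hflushc : pvFlush groups cur idx = if cur ≠ 0 then groups ++ [(cur, idx - 1)] else groups := rfl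
      have hnew : pvStepA (cur, maxi, idx, l) c =
          (cur + 1, (pvBest (pvFlush groups (cur + 1) (idx + 1))).1, idx + 1,
            (pvBest (pvFlush groups (cur + 1) (idx + 1))).2) := by
        have h1 : pvFlush groups (cur + 1) (idx + 1) = groups ++ [(cur + 1, idx)] := by
          have : cur + 1 ≠ 0 := by omega
          simp [pvFlush, this]
        rw [h1]
        rcases hpb : pvBest groups with ⟨bl, be⟩
        by_cases hz : cur = 0
        · have hinv' : (maxi, l) = (bl, be) := by
            rw [hinv, hz, pvFlush_zero, hpb]
          obtain ⟨hm, hl⟩ := Prod.mk.injEq .. ▸ hinv'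
          subst hm hl
          rw [pvBest_append, hpb]
          simp only [pvStepA, pvBestStep, hs, if_pos]
          split_ifs <;> rfl
        · have hinv' : (maxi, l) = pvBestStep (bl, be) (cur, idx - 1) := by
            rw [hinv]; simp [pvFlush, hz, pvBest_append, hpb]
          simp only [pvBestStep] at hinv'
          rw [pvBest_append, hpb]
          by_cases hgt : cur > bl
          · rw [if_pos hgt] at hinv'
            obtain ⟨hm, hl⟩ := Prod.mk.injEq .. ▸ hinv'
            subst hm hl
            simp only [pvStepA, pvBestStep, hs, if_pos]
            split_ifs <;> first | rfl | (exfalso; omega)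
          · rw [if_neg hgt] at hinv'
            obtain ⟨hm, hl⟩ := Prod.mk.injEq .. ▸ hinv'
            subst hm hl
            simp only [pvStepA, pvBestStep, hs, if_pos]
            split_ifs <;> rfl
      have hstepB : pvStepB (groups, cur, idx) c = (groups, cur + 1, idx + 1) := by
        simp [pvStepB, hs]
      have := ih ((pvBest (pvFlush groups (cur + 1) (idx + 1))).1)
        ((pvBest (pvFlush groups (cur + 1) (idx + 1))).2) groups (cur + 1) (idx + 1)
        (by omega) (by rfl)
      simp only [List.foldl_cons, hstepB]
      have hA : pvStepA (cur, maxi, idx, l) c =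
          ((cur + 1 : Int), (pvBest (pvFlush groups (cur + 1) (idx + 1))).1, (idx + 1 : Int),
            (pvBest (pvFlush groups (cur + 1) (idx + 1))).2) := hnew
      rw [hA]
      exact this
    · -- bad element: run resets
      have hstepA : pvStepA (cur, maxi, idx, l) c = ((0 : Int), maxi, idx + 1, l) := by
        simp [pvStepA, hs]
      have hstepB : pvStepB (groups, cur, idx) c = (pvFlush groups cur idx, 0, idx + 1) := by
        simp [pvStepB, hs]
      have hinv' : (maxi, l) = pvBest (pvFlush (pvFlush groups cur idx) 0 (idx + 1)) := by
        rw [pvFlush_zero]; exact hinv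
      have := ih maxi l (pvFlush groups cur idx) 0 (idx + 1) (le_refl 0) hinv'
      simp only [List.foldl_cons, hstepA, hstepB]
      exact this

-- ===== VERDICT (by name: the statement is the Claim_ definition above) =====
theorem f5a_spec : Claim_equal_f5a := by
  intro cs _
  unfold Spec_f5a f5a f5a_alt
  have h := pvInv cs 0 0 [] 0 0 (le_refl 0) (by simp [pvBest, pvFlush])
  rw [h.1]
  simp [pvBest]
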